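-- pv_equiv track=rewrite | github.com/BenderEg/Bioinformatics | 011 Pattern neighborhood.py | numberToPattern
-- ===== SOURCE A (Python) =====
-- def numberToPattern(index,
--                     k):  # создание функции, переводящей индекс при определенном k в последовательность нуклеотидов
--     k_mer_list = []  # содание пустого листа
--     k_mer_ACGT = []  # содание пустого листа
--     fractional_part = index  # исходный индекс присваивается переменной
--     reminder = 0  # в эту переменную записывается остаток от деления
--     k_mer = ''  # создание пустой строки
--     d = {0: 'A', 1: 'C', 2: 'G', 3: 'T'}
--     while fractional_part >= 4:  # цикл, пока целое отделения не будет меньше 3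
--         reminder = fractional_part % 4  # остаток от опередации деления на 4
--         fractional_part = fractional_part // 4  # целое от опередации деления на 4
--         k_mer_list.insert(0, reminder)  # добавление в начало листа остатка от деления
--     k_mer_list.insert(0, fractional_part)  # добавление в начало листа целого от последеней операции деления
--     while len(
--             k_mer_list) < k:  # цикл добавляющий нули в начало листа пока количество элементов в листе не будет соответствовать длине k
--         k_mer_list.insert(0, 0)
--     for ele in k_mer_list:  # переход от числового листа к буквенному
--         k_mer = k_mer + d[ele]
--     return k_mer
-- ===== SOURCE B (Python) =====
-- def numberToPattern(index, k):
--     d = {0: 'A', 1: 'C', 2: 'G', 3: 'T'}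
--     if index >= 4:
--         return numberToPattern(index // 4, k - 1) + d[index % 4]
--     return 'A' * (k - 1) + d[index]
-- ===== Notes on version B (the rewrite author's own statement) =====
-- stated objective: faster
-- what changed: Replaced A's three sequential loops (digit-collecting while, zero-padding while with list.insert(0,..), letter-mapping for, all over an intermediate digit list) by a single five-line recursion that appends letters least-significant digit first, padding with 'A'*(k-1) in the base case.
import Mathlib
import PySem

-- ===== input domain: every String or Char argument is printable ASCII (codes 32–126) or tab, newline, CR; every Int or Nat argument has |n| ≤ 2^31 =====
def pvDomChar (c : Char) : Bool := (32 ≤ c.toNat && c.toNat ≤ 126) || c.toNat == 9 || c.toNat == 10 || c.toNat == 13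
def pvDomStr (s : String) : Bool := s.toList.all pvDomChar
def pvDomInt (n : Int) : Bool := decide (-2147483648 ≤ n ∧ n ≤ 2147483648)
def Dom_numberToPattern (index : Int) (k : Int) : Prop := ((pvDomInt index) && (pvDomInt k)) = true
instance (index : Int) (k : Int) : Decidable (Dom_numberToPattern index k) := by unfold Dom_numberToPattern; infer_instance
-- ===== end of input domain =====

-- B replaces A's three loops over an intermediate digit list by one short recursion; same values, no speed claim.

-- termination helper cited by the ports: index // 4 shrinks when 4 ≤ index
theorem pvFd4_lt (fp : Int) (h : 4 ≤ fp) : (PySem.Int.floordiv fp 4).toNat < fp.toNat := by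
  have h1 : PySem.Int.floordiv fp 4 < fp :=
    (PySem.Int.floordiv_lt_iff_lt_mul (by norm_num)).mpr (by omega)
  have h2 : (0:Int) ≤ PySem.Int.floordiv fp 4 :=
    (PySem.Int.le_floordiv_iff_mul_le (by norm_num)).mpr (by omega)
  omega

-- ===== PORT A =====
-- the dict d = {0:'A',1:'C',2:'G',3:'T'}; exact on keys 0..3 (Pre_ excludes the negative
-- indices on which Python's d[ele] raises KeyError)
def pvDget (e : Int) : String :=
  if e = 0 then "A" else if e = 1 then "C" else if e = 2 then "G" else if e = 3 then "T" else ""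

-- first while loop: collect remainders, inserting at position 0 of k_mer_list
def pvALoop (fp : Int) (acc : List Int) : List Int :=
  if 4 ≤ fp then pvALoop (PySem.Int.floordiv fp 4) (PySem.Int.mod fp 4 :: acc) else fp :: acc
termination_by fp.toNat
decreasing_by exact pvFd4_lt _ (by assumption)

-- second while loop: prepend zeros while len(k_mer_list) < k
def pvAPad (l : List Int) (k : Int) : List Int :=
  if (l.length : Int) < k then pvAPad (0 :: l) k else l
termination_by (k - l.length).toNat
decreasing_by simp only [List.length_cons]; omega

def numberToPattern (index : Int) (k : Int) : String :=
  (pvAPad (pvALoop index []) k).foldl (fun s e => s ++ pvDget e) ""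

-- ===== PORT B =====
def numberToPattern_alt (index : Int) (k : Int) : String :=
  if 4 ≤ index then
    numberToPattern_alt (PySem.Int.floordiv index 4) (k - 1) ++ pvDget (PySem.Int.mod index 4)
  else
    String.ofList (List.replicate (k - 1).toNat 'A') ++ pvDget index
termination_by index.toNat
decreasing_by exact pvFd4_lt _ (by assumption)

-- ===== PRECONDITION & SPEC =====
-- Pre_ excludes index < 0, where both A and B raise KeyError (d has no negative keys).
def Pre_numberToPattern (index : Int) (k : Int) : Prop := 0 ≤ index
instance (index : Int) (k : Int) : Decidable (Pre_numberToPattern index k) := by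
  unfold Pre_numberToPattern; infer_instance
def pvWitness_numberToPattern : Int × Int := (11, 2)

def Spec_numberToPattern (index : Int) (k : Int) (out : String) : Prop := out = numberToPattern_alt index k
instance (index : Int) (k : Int) (out : String) : Decidable (Spec_numberToPattern index k out) := by unfold Spec_numberToPattern; infer_instance

-- ===== CLAIM (what is proved, stated in full; the proofs are below) =====
def Claim_equal_numberToPattern : Prop := ∀ (index : Int) (k : Int), Dom_numberToPattern index k → Pre_numberToPattern index k → Spec_numberToPattern index k (numberToPattern index k)

-- ===== LEMMAS AND PROOFS =====

-- the letter fold of A, as a function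
def pvLets (l : List Int) : String := l.foldl (fun s e => s ++ pvDget e) ""

theorem pvLets_init (l : List Int) (s : String) :
    l.foldl (fun s e => s ++ pvDget e) s = s ++ pvLets l := by
  induction l generalizing s with
  | nil => simp [pvLets]
  | cons x xs ih =>
      simp only [pvLets, List.foldl_cons]
      rw [ih, ih ("" ++ pvDget x)]
      simp [String.append_assoc, String.empty_append]

theorem pvLets_append (l : List Int) (r : Int) :
    pvLets (l ++ [r]) = pvLets l ++ pvDget r := by
  simp only [pvLets, List.foldl_append, List.foldl_cons, List.foldl_nil]

theorem pvLets_cons (x : Int) (l : List Int) :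
    pvLets (x :: l) = pvDget x ++ pvLets l := by
  conv_lhs => rw [pvLets]
  simp only [List.foldl_cons]
  rw [pvLets_init, String.empty_append]

theorem pvALoop_acc (fp : Int) (acc : List Int) :
    pvALoop fp acc = pvALoop fp [] ++ acc := by
  by_cases h : 4 ≤ fp
  · conv_lhs => rw [pvALoop]
    conv_rhs => rw [pvALoop]
    rw [if_pos h, if_pos h]
    rw [pvALoop_acc _ (PySem.Int.mod fp 4 :: acc),
        pvALoop_acc _ [PySem.Int.mod fp 4]]
    simp
  · conv_lhs => rw [pvALoop]
    conv_rhs => rw [pvALoop]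
    rw [if_neg h, if_neg h]
    simp
termination_by fp.toNat
decreasing_by all_goals exact pvFd4_lt _ (by assumption)

theorem pvAPad_append (l : List Int) (r : Int) (k : Int) :
    pvAPad (l ++ [r]) k = pvAPad l (k - 1) ++ [r] := by
  by_cases h : (l.length : Int) < k - 1
  · have h' : (((l ++ [r]).length : Int)) < k := by
      simp only [List.length_append, List.length_cons, List.length_nil]
      push_cast; omega
    conv_lhs => rw [pvAPad]
    conv_rhs => rw [pvAPad]
    rw [if_pos h', if_pos h]
    have : (0 : Int) :: (l ++ [r]) = (0 :: l) ++ [r] := rfl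
    rw [this, pvAPad_append (0 :: l) r k]
  · have h' : ¬ (((l ++ [r]).length : Int)) < k := by
      simp only [List.length_append, List.length_cons, List.length_nil]
      push_cast; omega
    conv_lhs => rw [pvAPad]
    conv_rhs => rw [pvAPad]
    rw [if_neg h', if_neg h]
termination_by (k - l.length).toNat
decreasing_by simp only [List.length_cons]; omega

theorem pvLets_pad (l : List Int) (k : Int) :
    pvLets (pvAPad l k) = String.ofList (List.replicate (k - l.length).toNat 'A') ++ pvLets l := by
  by_cases h : (l.length : Int) < k
  · conv_lhs => rw [pvAPad]
    rw [if_pos h, pvLets_pad (0 :: l) k, pvLets_cons]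
    have hd : pvDget 0 = String.ofList ['A'] := rfl
    rw [hd, ← String.append_assoc, ← String.ofList_append]
    have hn : List.replicate (k - ((0 :: l).length : Int)).toNat 'A' ++ ['A']
        = List.replicate (k - (l.length : Int)).toNat 'A' := by
      rw [← List.replicate_succ']
      congr 1
      simp only [List.length_cons]
      omega
    rw [hn]
  · conv_lhs => rw [pvAPad]
    rw [if_neg h]
    have : (k - (l.length : Int)).toNat = 0 := by omega
    rw [this]
    simp [String.empty_append]
termination_by (k - l.length).toNat
decreasing_by simp only [List.length_cons]; omega

theorem pv_main (index : Int) (k : Int) (h : 0 ≤ index) :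
    numberToPattern index k = numberToPattern_alt index k := by
  rw [numberToPattern_alt]
  by_cases h4 : 4 ≤ index
  · rw [if_pos h4]
    have hdiv0 : 0 ≤ PySem.Int.floordiv index 4 :=
      (PySem.Int.le_floordiv_iff_mul_le (by norm_num)).mpr (by omega)
    have hloop : pvALoop index [] =
        pvALoop (PySem.Int.floordiv index 4) [] ++ [PySem.Int.mod index 4] := by
      conv_lhs => rw [pvALoop]
      rw [if_pos h4, pvALoop_acc]
    show pvLets (pvAPad (pvALoop index []) k) = _
    rw [hloop, pvAPad_append, pvLets_append]
    rw [show pvLets (pvAPad (pvALoop (PySem.Int.floordiv index 4) []) (k - 1))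
        = numberToPattern (PySem.Int.floordiv index 4) (k - 1) from rfl]
    rw [pv_main (PySem.Int.floordiv index 4) (k - 1) hdiv0]
  · rw [if_neg h4]
    have hloop : pvALoop index [] = [index] := by rw [pvALoop, if_neg h4]
    show pvLets (pvAPad (pvALoop index []) k) = _
    rw [hloop, pvLets_pad, pvLets_cons]
    simp only [List.length_cons, List.length_nil]
    rw [show pvLets [] = "" from rfl, String.append_empty]
    norm_num
termination_by index.toNat
decreasing_by exact pvFd4_lt _ (by assumption)

-- ===== VERDICT (by name: the statement is the Claim_ definition above) =====
theorem numberToPattern_spec : Claim_equal_numberToPattern := by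
  intro index k _ hpre
  exact pv_main index k hpre
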